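-- pv_equiv track=rewrite | github.com/Held0fTheWelt/BLACKVEIN | world-engine/app/story_runtime_shell_readout.py | _active_pressure_summary
-- ===== SOURCE A (Python) =====
-- def _active_pressure_summary(open_pressures: list[str]) -> str:
--     if not open_pressures:
--         return "No single pressure has cleared the room; the tension remains socially distributed."
--     labels: list[str] = []
--     for item in open_pressures:
--         low = item.lower()
--         if "departure" in low or "exit" in low:
--             labels.append("departure pressure")
--         elif "ambiguity" in low:
--             labels.append("reading dispute")
--         elif "blame" in low:
--             labels.append("blame pressure")
--         elif "repair" in low:
--             labels.append("fragile repair")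
--         elif "alliance" in low:
--             labels.append("alliance instability")
--         else:
--             labels.append(item.replace("_", " "))
--     deduped: list[str] = []
--     for label in labels:
--         if label not in deduped:
--             deduped.append(label)
--     return "Still live: " + ", ".join(deduped[:3])
-- ===== SOURCE B (Python) =====
-- _RULES = [
--     (("departure", "exit"), "departure pressure"),
--     (("ambiguity",), "reading dispute"),
--     (("blame",), "blame pressure"),
--     (("repair",), "fragile repair"),
--     (("alliance",), "alliance instability"),
-- ]
--
--
-- def _active_pressure_summary(open_pressures: list[str]) -> str:
--     if not open_pressures:
--         return "No single pressure has cleared the room; the tension remains socially distributed."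
--     result: list[str] = []
--     for item in open_pressures:
--         if len(result) == 3:
--             break
--         low = item.lower()
--         for keywords, label in _RULES:
--             if any(k in low for k in keywords):
--                 break
--         else:
--             label = item.replace("_", " ")
--         if label not in result:
--             result.append(label)
--     return "Still live: " + ", ".join(result)
-- ===== Notes on version B (the rewrite author's own statement) =====
-- stated objective: faster
-- what changed: Replaces A's three-phase pipeline (label-mapping loop with a hard-coded if/elif chain, then a quadratic dedup loop over all labels, then a slice) with a single fused pass driven by a data table of (keywords, label) rules that appends each new distinct label to a result list capped at three and breaks early.
import Mathlib
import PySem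

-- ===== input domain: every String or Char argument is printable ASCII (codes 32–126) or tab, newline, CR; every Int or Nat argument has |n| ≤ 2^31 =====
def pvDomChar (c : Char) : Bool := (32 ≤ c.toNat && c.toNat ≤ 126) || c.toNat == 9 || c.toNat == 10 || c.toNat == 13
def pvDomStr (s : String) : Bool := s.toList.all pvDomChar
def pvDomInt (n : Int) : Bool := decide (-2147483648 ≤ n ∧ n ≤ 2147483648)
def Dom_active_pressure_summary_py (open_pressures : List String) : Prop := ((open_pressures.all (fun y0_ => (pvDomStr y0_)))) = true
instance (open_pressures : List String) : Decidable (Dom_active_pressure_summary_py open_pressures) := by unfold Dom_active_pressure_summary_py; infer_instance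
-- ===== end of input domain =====

-- B fuses A's label/dedup/slice pipeline into one table-driven pass whose result list is capped at three, removing A's quadratic dedup scan (objective: faster; measured).

-- ===== PORT A =====
def active_pressure_summary_py (open_pressures : List String) : String :=
  if open_pressures = [] then
    "No single pressure has cleared the room; the tension remains socially distributed."
  else
    let labels := open_pressures.foldl (fun labels item =>
      let low := PySem.Str.lower item
      if PySem.Str.isIn "departure" low || PySem.Str.isIn "exit" low then
        labels ++ ["departure pressure"]
      else if PySem.Str.isIn "ambiguity" low then labels ++ ["reading dispute"]
      else if PySem.Str.isIn "blame" low then labels ++ ["blame pressure"]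
      else if PySem.Str.isIn "repair" low then labels ++ ["fragile repair"]
      else if PySem.Str.isIn "alliance" low then labels ++ ["alliance instability"]
      else labels ++ [PySem.Str.replace item "_" " "]) []
    let deduped := labels.foldl (fun deduped label =>
      if label ∈ deduped then deduped else deduped ++ [label]) []
    "Still live: " ++ PySem.Str.join ", " (PySem.List.slice deduped none (some 3))

-- ===== PORT B =====
def pvRules : List (List String × String) :=
  [(["departure", "exit"], "departure pressure"),
   (["ambiguity"], "reading dispute"),
   (["blame"], "blame pressure"),
   (["repair"], "fragile repair"),
   (["alliance"], "alliance instability")]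

def pvLabelB (item : String) : String :=
  let low := PySem.Str.lower item
  match pvRules.find? (fun r => r.1.any (fun k => PySem.Str.isIn k low)) with
  | some r => r.2
  | none => PySem.Str.replace item "_" " "

def pvGoB : List String → List String → List String
  | result, [] => result
  | result, item :: rest =>
    if result.length = 3 then result
    else
      let label := pvLabelB item
      pvGoB (if label ∈ result then result else result ++ [label]) rest

def active_pressure_summary_py_alt (open_pressures : List String) : String :=
  if open_pressures = [] then
    "No single pressure has cleared the room; the tension remains socially distributed."
  else
    "Still live: " ++ PySem.Str.join ", " (pvGoB [] open_pressures)

-- ===== PRECONDITION & SPEC =====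
def Spec_active_pressure_summary_py (open_pressures : List String) (out : String) : Prop := out = active_pressure_summary_py_alt open_pressures
instance (open_pressures : List String) (out : String) : Decidable (Spec_active_pressure_summary_py open_pressures out) := by unfold Spec_active_pressure_summary_py; infer_instance

-- ===== CLAIM (what is proved, stated in full; the proofs are below) =====
def Claim_equal_active_pressure_summary_py : Prop := ∀ (open_pressures : List String), Dom_active_pressure_summary_py open_pressures → Spec_active_pressure_summary_py open_pressures (active_pressure_summary_py open_pressures)

-- ===== LEMMAS AND PROOFS =====

/-- A's label for one item, factored out of A's first loop body. -/
def pvLabelA (item : String) : String :=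
  let low := PySem.Str.lower item
  if PySem.Str.isIn "departure" low || PySem.Str.isIn "exit" low then "departure pressure"
  else if PySem.Str.isIn "ambiguity" low then "reading dispute"
  else if PySem.Str.isIn "blame" low then "blame pressure"
  else if PySem.Str.isIn "repair" low then "fragile repair"
  else if PySem.Str.isIn "alliance" low then "alliance instability"
  else PySem.Str.replace item "_" " "

/-- A's branch chain and B's rules table agree on every item. -/
lemma pvLabel_eq (item : String) : pvLabelA item = pvLabelB item := by
  unfold pvLabelA pvLabelB pvRules
  cases h1 : PySem.Str.isIn "departure" (PySem.Str.lower item) <;>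
  cases h2 : PySem.Str.isIn "exit" (PySem.Str.lower item) <;>
  cases h3 : PySem.Str.isIn "ambiguity" (PySem.Str.lower item) <;>
  cases h4 : PySem.Str.isIn "blame" (PySem.Str.lower item) <;>
  cases h5 : PySem.Str.isIn "repair" (PySem.Str.lower item) <;>
  cases h6 : PySem.Str.isIn "alliance" (PySem.Str.lower item) <;>
    simp only [List.find?, List.any, h1, h2, h3, h4, h5, h6] <;> rfl

/-- A's dedup-step body. -/
def pvDedupStep (acc : List String) (l : String) : List String :=
  if l ∈ acc then acc else acc ++ [l]

lemma pvDedup_suffix (ls : List String) : ∀ acc, ∃ t, ls.foldl pvDedupStep acc = acc ++ t := by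
  induction ls with
  | nil => intro acc; exact ⟨[], by simp⟩
  | cons l ls ih =>
    intro acc
    simp only [List.foldl_cons, pvDedupStep]
    split_ifs with h
    · exact ih acc
    · obtain ⟨t, ht⟩ := ih (acc ++ [l])
      exact ⟨[l] ++ t, by simpa using ht⟩

/-- Main invariant: A's "dedup everything then take 3" equals B's early-stopping pass. -/
lemma pvMain (xs : List String) : ∀ acc, acc.length ≤ 3 →
    ((xs.map pvLabelA).foldl pvDedupStep acc).take 3 = pvGoB acc xs := by
  induction xs with
  | nil => intro acc h; simp [pvGoB, List.take_of_length_le h]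
  | cons x xs ih =>
    intro acc h
    simp only [List.map_cons, List.foldl_cons, pvGoB]
    by_cases h3 : acc.length = 3
    · rw [if_pos h3]
      obtain ⟨t, ht⟩ := pvDedup_suffix (xs.map pvLabelA) (pvDedupStep acc (pvLabelA x))
      have hs : ∃ s, pvDedupStep acc (pvLabelA x) = acc ++ s := by
        simp only [pvDedupStep]
        split_ifs
        · exact ⟨[], by simp⟩
        · exact ⟨[pvLabelA x], rfl⟩
      obtain ⟨s, hs⟩ := hs
      rw [ht, hs, List.append_assoc, ← h3, List.take_left]
    · rw [if_neg h3]
      have hlen : (pvDedupStep acc (pvLabelA x)).length ≤ 3 := by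
        simp only [pvDedupStep]
        split_ifs
        · exact h
        · simp only [List.length_append, List.length_cons, List.length_nil]; omega
      rw [ih _ hlen, pvLabel_eq]
      rfl

lemma pvFoldA_eq (xs : List String) : ∀ init, xs.foldl (fun labels item =>
      let low := PySem.Str.lower item
      if PySem.Str.isIn "departure" low || PySem.Str.isIn "exit" low then
        labels ++ ["departure pressure"]
      else if PySem.Str.isIn "ambiguity" low then labels ++ ["reading dispute"]
      else if PySem.Str.isIn "blame" low then labels ++ ["blame pressure"]
      else if PySem.Str.isIn "repair" low then labels ++ ["fragile repair"]
      else if PySem.Str.isIn "alliance" low then labels ++ ["alliance instability"]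
      else labels ++ [PySem.Str.replace item "_" " "]) init = init ++ xs.map pvLabelA := by
  induction xs with
  | nil => intro init; simp
  | cons x xs ih =>
    intro init
    simp only [List.foldl_cons, List.map_cons, ih]
    simp only [pvLabelA]
    split_ifs <;> simp

-- ===== VERDICT (by name: the statement is the Claim_ definition above) =====
theorem active_pressure_summary_py_spec : Claim_equal_active_pressure_summary_py := by
  intro xs _
  unfold Spec_active_pressure_summary_py active_pressure_summary_py active_pressure_summary_py_alt
  by_cases h : xs = []
  · simp [h]
  · simp only [if_neg h, pvFoldA_eq, List.nil_append]
    rw [show (3:Int) = ((3:Nat):Int) from rfl, PySem.List.slice_to_natCast]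
    rw [show (List.foldl (fun deduped label => if label ∈ deduped then deduped else deduped ++ [label]) [] (xs.map pvLabelA)) = List.foldl pvDedupStep [] (xs.map pvLabelA) from rfl]
    rw [pvMain xs [] (by simp)]
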